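-- pv_equiv track=rewrite | github.com/juyeonbae/coding | Programmers/Lv.0/Lv.0_커피 심부름.py | solution
-- ===== SOURCE A (Python) =====
-- def solution(order):
--     answer = 0
--     for i in order:
--         if 'latte' in i:
--               answer += 5000
--         else:
--               answer += 4500
--     return answer
-- ===== SOURCE B (Python) =====
-- def solution(order):
--     # divide and conquer: total of a list = total of its two halves
--     if not order:
--         return 0
--     if len(order) == 1:
--         return 5000 if 'latte' in order[0] else 4500
--     mid = len(order) // 2
--     return solution(order[:mid]) + solution(order[mid:])
-- ===== Notes on version B (the rewrite author's own statement) =====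
-- stated objective: alternative
-- what changed: B computes the total by divide-and-conquer recursion on the two halves of the list (base cases empty / single order), instead of A's single left-to-right pass with an accumulator and a per-item branch.
import Mathlib
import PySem

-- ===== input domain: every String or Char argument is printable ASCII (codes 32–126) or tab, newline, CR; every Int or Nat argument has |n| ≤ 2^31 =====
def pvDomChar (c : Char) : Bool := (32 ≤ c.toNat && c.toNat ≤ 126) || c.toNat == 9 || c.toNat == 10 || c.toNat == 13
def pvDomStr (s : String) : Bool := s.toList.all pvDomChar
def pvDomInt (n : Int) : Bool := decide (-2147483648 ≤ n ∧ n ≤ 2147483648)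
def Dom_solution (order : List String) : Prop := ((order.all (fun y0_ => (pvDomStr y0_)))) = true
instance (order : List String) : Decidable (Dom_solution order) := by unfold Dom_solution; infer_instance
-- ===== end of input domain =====

-- B totals the bill by divide-and-conquer recursion on the two halves of the list instead of A's single accumulating pass (alternative decomposition).

-- ===== PORT A =====
def solution (order : List String) : Int :=
  order.foldl (fun answer i =>
    if PySem.Str.isIn "latte" i then answer + 5000 else answer + 4500) 0

-- ===== PORT B =====
def solution_alt (order : List String) : Int :=
  if order.length = 0 then 0
  else if order.length = 1 then
    -- order[0]: in range since len = 1
    if PySem.Str.isIn "latte" ((PySem.List.pyGet? order 0).getD "") then 5000 else 4500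
  else
    -- mid = len(order) // 2 (inlined)
    solution_alt (PySem.List.slice order none (some ((order.length / 2 : Nat) : Int))) +
      solution_alt (PySem.List.slice order (some ((order.length / 2 : Nat) : Int)) none)
termination_by order.length
decreasing_by
  · simp only [PySem.List.slice_to_natCast, List.length_take]; omega
  · simp only [PySem.List.slice_from_natCast, List.length_drop]; omega

-- ===== PRECONDITION & SPEC =====
def Spec_solution (order : List String) (out : Int) : Prop := out = solution_alt order
instance (order : List String) (out : Int) : Decidable (Spec_solution order out) := by unfold Spec_solution; infer_instance

-- ===== CLAIM (what is proved, stated in full; the proofs are below) =====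
def Claim_equal_solution : Prop := ∀ (order : List String), Dom_solution order → Spec_solution order (solution order)

-- ===== LEMMAS AND PROOFS =====

theorem foldl_shift (a : Int) (xs : List String) :
    xs.foldl (fun answer i => if PySem.Str.isIn "latte" i then answer + 5000 else answer + 4500) a
    = a + xs.foldl (fun answer i => if PySem.Str.isIn "latte" i then answer + 5000 else answer + 4500) 0 := by
  induction xs generalizing a with
  | nil => simp
  | cons x xs ihx =>
    simp only [List.foldl_cons]
    rw [ihx, ihx (if PySem.Str.isIn "latte" x then (0:Int) + 5000 else 0 + 4500)]
    split_ifs <;> ring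

-- A's accumulating pass is additive over append.
theorem solution_append (xs ys : List String) :
    solution (xs ++ ys) = solution xs + solution ys := by
  simp only [solution, List.foldl_append]
  rw [foldl_shift (xs.foldl _ 0)]

theorem solution_eq_alt (order : List String) : solution_alt order = solution order := by
  induction hn : order.length using Nat.strong_induction_on generalizing order with
  | _ n ih =>
    rw [solution_alt]
    split_ifs with h0 h1 hc
    · rw [List.length_eq_zero_iff.mp h0]; rfl
    · obtain ⟨s, hs⟩ := List.length_eq_one_iff.mp h1
      subst hs
      simp [PySem.List.pyGet?, PySem.List.pyIdx?] at hc
      simp [solution, PySem.Str.isIn, hc]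
    · obtain ⟨s, hs⟩ := List.length_eq_one_iff.mp h1
      subst hs
      simp [PySem.List.pyGet?, PySem.List.pyIdx?] at hc
      simp [solution, PySem.Str.isIn, hc]
    · have e1 := ih (order.take (order.length / 2)).length
        (by simp only [List.length_take]; omega) (order.take (order.length / 2)) rfl
      have e2 := ih (order.drop (order.length / 2)).length
        (by simp only [List.length_drop]; omega) (order.drop (order.length / 2)) rfl
      rw [PySem.List.slice_to_natCast, PySem.List.slice_from_natCast, e1, e2,
        ← solution_append, List.take_append_drop]

-- ===== VERDICT (by name: the statement is the Claim_ definition above) =====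
theorem solution_spec : Claim_equal_solution := by
  intro order _
  unfold Spec_solution
  exact (solution_eq_alt order).symm
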